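-- pv_equiv track=rewrite | github.com/lazarmarek/UvA-Thesis | study1/src/DatasetConstructor.py | _is_image_in_valid_section
-- ===== SOURCE A (Python) =====
-- def _is_image_in_valid_section(md_content, image_filename):
--     lines = md_content.split('\n')
--
--     # Find image position
--     image_line_idx = None
--     for i, line in enumerate(lines):
--         if image_filename in line and ('![Image]' in line):
--             image_line_idx = i
--             break
--
--     if image_line_idx is None:
--         return False
--
--     # Look backwards for "References" section
--     for i in range(image_line_idx, -1, -1):
--         line = lines[i].strip().lower()
--         if line.startswith('#') and 'references' in line:
--             return False  # Found references before image = invalid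
--
--     return True  # No references found = valid
-- ===== SOURCE B (Python) =====
-- def _is_image_in_valid_section(md_content, image_filename):
--     seen_references = False
--     for line in md_content.split('\n'):
--         stripped = line.strip().lower()
--         if stripped.startswith('#') and 'references' in stripped:
--             seen_references = True
--         if image_filename in line and '![Image]' in line:
--             return not seen_references
--     return False
-- ===== Notes on version B (the rewrite author's own statement) =====
-- stated objective: simpler
-- what changed: Replaces the two-phase find-the-image-then-scan-backwards structure by a single forward pass that carries a seen_references flag and answers at the image line.
import Mathlib
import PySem

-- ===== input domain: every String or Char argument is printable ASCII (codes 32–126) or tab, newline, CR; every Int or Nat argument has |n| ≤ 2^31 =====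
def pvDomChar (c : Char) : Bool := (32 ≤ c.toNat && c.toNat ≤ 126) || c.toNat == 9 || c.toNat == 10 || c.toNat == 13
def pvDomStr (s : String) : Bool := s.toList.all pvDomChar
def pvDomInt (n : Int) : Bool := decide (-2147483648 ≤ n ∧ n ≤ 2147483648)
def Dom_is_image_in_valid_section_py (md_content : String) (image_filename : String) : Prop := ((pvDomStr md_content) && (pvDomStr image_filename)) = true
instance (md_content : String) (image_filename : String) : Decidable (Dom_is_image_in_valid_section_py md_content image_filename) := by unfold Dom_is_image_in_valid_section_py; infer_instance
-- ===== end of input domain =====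

-- B replaces A's find-then-scan-backward structure by one forward pass carrying a seen-references flag (simpler; return value only).


-- ===== PORT A =====
-- the 'for i, line in enumerate(lines): … break' search for the image line
def pvFindImgA (image_filename : String) : List (Int × String) → Option Int
  | [] => none
  | (i, line) :: rest =>
    if PySem.Str.isIn image_filename line && PySem.Str.isIn "![Image]" line then some i
    else pvFindImgA image_filename rest

-- the backward 'for i in range(image_line_idx, -1, -1)' scan; lines[i] is always in
-- range here (0 ≤ i ≤ image_line_idx < len(lines)), so pyGetD with default "" is exact
def pvRefsBack (lines : List String) : List Int → Bool
  | [] => true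
  | i :: rest =>
    let line := PySem.Str.lower (PySem.Str.strip (PySem.List.pyGetD lines i ""))
    if PySem.Str.startswith line "#" && PySem.Str.isIn "references" line then false
    else pvRefsBack lines rest

def is_image_in_valid_section_py (md_content : String) (image_filename : String) : Bool :=
  -- md_content.split('\n'): the separator is nonempty, so split? always returns some
  let lines := (PySem.Str.split? md_content "\n").getD []
  match pvFindImgA image_filename (PySem.List.enumerate lines) with
  | none => false
  | some idx => pvRefsBack lines (PySem.List.pyRange idx (-1) (-1))

-- ===== PORT B =====
def pvScanB (image_filename : String) : List String → Bool → Bool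
  | [], _ => false
  | line :: rest, seen =>
    let stripped := PySem.Str.lower (PySem.Str.strip line)
    let seen' := seen || (PySem.Str.startswith stripped "#" && PySem.Str.isIn "references" stripped)
    if PySem.Str.isIn image_filename line && PySem.Str.isIn "![Image]" line then !seen'
    else pvScanB image_filename rest seen'

def is_image_in_valid_section_py_alt (md_content : String) (image_filename : String) : Bool :=
  pvScanB image_filename ((PySem.Str.split? md_content "\n").getD []) false

-- ===== PRECONDITION & SPEC =====
def Spec_is_image_in_valid_section_py (md_content : String) (image_filename : String) (out : Bool) : Prop := out = is_image_in_valid_section_py_alt md_content image_filename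
instance (md_content : String) (image_filename : String) (out : Bool) : Decidable (Spec_is_image_in_valid_section_py md_content image_filename out) := by unfold Spec_is_image_in_valid_section_py; infer_instance

-- ===== CLAIM (what is proved, stated in full; the proofs are below) =====
def Claim_equal_is_image_in_valid_section_py : Prop := ∀ (md_content : String) (image_filename : String), Dom_is_image_in_valid_section_py md_content image_filename → Spec_is_image_in_valid_section_py md_content image_filename (is_image_in_valid_section_py md_content image_filename)

-- ===== LEMMAS AND PROOFS =====
-- the two line predicates, named so the proofs can treat them as opaque booleans
def pvIsImg (image_filename line : String) : Bool :=
  PySem.Str.isIn image_filename line && PySem.Str.isIn "![Image]" line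

def pvIsRef (line : String) : Bool :=
  let l := PySem.Str.lower (PySem.Str.strip line)
  PySem.Str.startswith l "#" && PySem.Str.isIn "references" l

theorem pvFindImgA_enumerate (ifn : String) (ls : List String) (s : Int) :
    pvFindImgA ifn (PySem.List.enumerate ls s)
      = Option.map (fun k : Nat => s + Int.ofNat k) (ls.findIdx? (fun l => pvIsImg ifn l)) := by
  induction ls generalizing s with
  | nil => simp [pvFindImgA, PySem.List.enumerate_nil]
  | cons h t ih =>
    rw [PySem.List.enumerate_cons]
    show (if pvIsImg ifn h then some s else pvFindImgA ifn (PySem.List.enumerate t (s + 1)))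
      = Option.map (fun k : Nat => s + Int.ofNat k) ((h :: t).findIdx? (fun l => pvIsImg ifn l))
    rw [List.findIdx?_cons]
    cases hh : pvIsImg ifn h with
    | true => simp
    | false =>
      rw [if_neg (by simp), if_neg (by simp_all), ih]
      cases t.findIdx? (fun l => pvIsImg ifn l) <;> simp <;> ring

theorem pvRefsBack_range (ls : List String) (n : Nat) (hn : n < ls.length) :
    pvRefsBack ls (PySem.List.pyRange (n : Int) (-1) (-1))
      = !((ls.take (n + 1)).any (fun l => pvIsRef l)) := by
  induction n with
  | zero =>
    rw [PySem.List.pyRange_neg_one_cons (by norm_num),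
        PySem.List.pyRange_neg_one_eq_nil (by norm_num)]
    show (if pvIsRef (PySem.List.pyGetD ls 0 "") then false else true) = _
    cases ls with
    | nil => simp at hn
    | cons h t =>
      have h0 : PySem.List.pyGetD (h :: t) (0 : Int) "" = h := by
        simp [PySem.List.pyGetD, PySem.List.pyGet?, PySem.List.pyIdx?]
      rw [h0]
      cases hr : pvIsRef h <;> simp [hr]
  | succ m ih =>
    have hm : m < ls.length := Nat.lt_of_succ_lt hn
    rw [PySem.List.pyRange_neg_one_cons (by omega)]
    show (if pvIsRef (PySem.List.pyGetD ls ((m : Int) + 1) "")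
            then false else pvRefsBack ls (PySem.List.pyRange ((m : Int) + 1 - 1) (-1) (-1))) = _
    have hget : PySem.List.pyGetD ls ((m : Int) + 1) "" = ls[m + 1] := by
      have := PySem.List.pyGetD_of_nonneg (xs := ls) (i := ((m + 1 : Nat) : Int)) (d := "")
        (by positivity)
      push_cast at this
      rw [this]
      simp [List.getElem?_eq_getElem hn]
    have htake : ls.take (m + 1 + 1) = ls.take (m + 1) ++ [ls[m + 1]] := by
      rw [List.take_add_one]
      simp [List.getElem?_eq_getElem hn]
    have hidx : ((m : Int) + 1 - 1) = (m : Int) := by ring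
    have hany : (ls.take (m + 1 + 1)).any (fun l => pvIsRef l)
        = ((ls.take (m + 1)).any (fun l => pvIsRef l) || pvIsRef ls[m + 1]) := by
      rw [htake]; simp only [List.any_append, List.any_cons, List.any_nil, Bool.or_false]
    rw [hget, hidx, ih hm, hany]
    cases hr : pvIsRef ls[m + 1] <;> simp_all

theorem pvScanB_eq (ifn : String) (ls : List String) (seen : Bool) :
    pvScanB ifn ls seen
      = match ls.findIdx? (fun l => pvIsImg ifn l) with
        | none => false
        | some k => !(seen || (ls.take (k + 1)).any (fun l => pvIsRef l)) := by
  induction ls generalizing seen with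
  | nil => simp [pvScanB]
  | cons h t ih =>
    show (if pvIsImg ifn h then !(seen || pvIsRef h)
          else pvScanB ifn t (seen || pvIsRef h)) = _
    rw [List.findIdx?_cons]
    cases hh : pvIsImg ifn h with
    | true =>
      rw [if_pos rfl]
      simp
    | false =>
      rw [if_neg (by simp), if_neg (by simp_all), ih]
      cases hfi : t.findIdx? (fun l => pvIsImg ifn l) with
      | none => simp
      | some k =>
        simp only [Option.map_some, List.take_succ_cons, List.any_cons]
        cases seen <;> cases hr : pvIsRef h <;> simp_all

theorem pvFindIdx?_lt_length {ifn : String} {ls : List String} {k : Nat}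
    (h : ls.findIdx? (fun l => pvIsImg ifn l) = some k) : k < ls.length :=
  (List.findIdx?_eq_some_iff_findIdx_eq.mp h).1

-- ===== VERDICT (by name: the statement is the Claim_ definition above) =====
theorem is_image_in_valid_section_py_spec : Claim_equal_is_image_in_valid_section_py := by
  intro md ifn _
  unfold Spec_is_image_in_valid_section_py
  unfold is_image_in_valid_section_py is_image_in_valid_section_py_alt
  set ls := (PySem.Str.split? md "\n").getD [] with hls
  show (match pvFindImgA ifn (PySem.List.enumerate ls) with
        | none => false
        | some idx => pvRefsBack ls (PySem.List.pyRange idx (-1) (-1))) = _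
  rw [pvScanB_eq, pvFindImgA_enumerate ifn ls 0]
  cases hfi : ls.findIdx? (fun l => pvIsImg ifn l) with
  | none => simp
  | some k =>
    simp only [Option.map_some]
    have hcast : (0 : Int) + Int.ofNat k = ((k : Nat) : Int) := by simp
    rw [hcast, pvRefsBack_range ls k (pvFindIdx?_lt_length hfi)]
    simp
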